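-- pv_equiv track=rewrite | github.com/autonomous-agent-stack/autonomous-agent-stack | scripts/telegram_ingress_health.py | _count_log_signals
-- ===== SOURCE A (Python) =====
-- def _count_log_signals(text: str) -> dict[str, int]:
--     lines = text.splitlines()
--     out = {
--         "lines_total": len(lines),
--         "http_409": 0,
--         "conflict_token": 0,
--         "getupdates_hint": 0,
--     }
--     for line in lines:
--         lower = line.lower()
--         if "409" in line and ("conflict" in lower or "http error 409" in lower):
--             out["http_409"] += 1
--         if "conflict" in lower and ("telegram" in lower or "webhook" in lower or "poller" in lower):
--             out["conflict_token"] += 1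
--         if "getupdates" in lower and ("409" in line or "conflict" in lower):
--             out["getupdates_hint"] += 1
--     return out
-- ===== SOURCE B (Python) =====
-- def _count_log_signals(text: str) -> dict[str, int]:
--     # Histogram of boolean signal signatures, then aggregate from the histogram.
--     hist = {}
--     for line in text.splitlines():
--         low = line.lower()
--         sig = (
--             "409" in line and ("conflict" in low or "http error 409" in low),
--             "conflict" in low and ("telegram" in low or "webhook" in low or "poller" in low),
--             "getupdates" in low and ("409" in line or "conflict" in low),
--         )
--         hist[sig] = hist.get(sig, 0) + 1
--     total = http_409 = conflict_token = getupdates_hint = 0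
--     for sig, k in hist.items():
--         total += k
--         if sig[0]:
--             http_409 += k
--         if sig[1]:
--             conflict_token += k
--         if sig[2]:
--             getupdates_hint += k
--     return {
--         "lines_total": total,
--         "http_409": http_409,
--         "conflict_token": conflict_token,
--         "getupdates_hint": getupdates_hint,
--     }
-- ===== Notes on version B (the rewrite author's own statement) =====
-- stated objective: alternative
-- what changed: Instead of A's fused pass mutating four named counters, B builds a histogram keyed by each line's boolean signal signature (one dict-counting pass), then derives all four outputs by aggregating the histogram entries.
import Mathlib
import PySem

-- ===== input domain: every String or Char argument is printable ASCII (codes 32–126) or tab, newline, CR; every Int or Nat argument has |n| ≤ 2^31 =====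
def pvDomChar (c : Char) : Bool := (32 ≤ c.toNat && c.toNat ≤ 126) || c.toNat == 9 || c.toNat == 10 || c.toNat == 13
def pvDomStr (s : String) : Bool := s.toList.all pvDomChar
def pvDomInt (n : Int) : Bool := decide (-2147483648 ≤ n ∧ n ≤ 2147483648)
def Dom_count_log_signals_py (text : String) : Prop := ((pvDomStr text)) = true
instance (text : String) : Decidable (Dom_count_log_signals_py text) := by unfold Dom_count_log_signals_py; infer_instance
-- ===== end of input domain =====

-- B replaces A's fused per-line counter updates with a histogram of boolean
-- signal signatures aggregated afterwards (alternative decomposition, same cost).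

-- ===== PORT A =====
def count_log_signals_py (text : String) : List (String × Int) :=
  let lines := PySem.Str.splitlines text
  let out : PySem.Dict String Int := PySem.Dict.ofList
    [("lines_total", (lines.length : Int)), ("http_409", 0),
     ("conflict_token", 0), ("getupdates_hint", 0)]
  let out := lines.foldl (fun out line =>
    let lower := PySem.Str.lower line
    let out := if PySem.Str.isIn "409" line &&
        (PySem.Str.isIn "conflict" lower || PySem.Str.isIn "http error 409" lower) then
        out.modify "http_409" 0 (· + 1) else out
    let out := if PySem.Str.isIn "conflict" lower &&
        (PySem.Str.isIn "telegram" lower || PySem.Str.isIn "webhook" lower ||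
         PySem.Str.isIn "poller" lower) then
        out.modify "conflict_token" 0 (· + 1) else out
    let out := if PySem.Str.isIn "getupdates" lower &&
        (PySem.Str.isIn "409" line || PySem.Str.isIn "conflict" lower) then
        out.modify "getupdates_hint" 0 (· + 1) else out
    out) out
  out.items

-- ===== PORT B =====
def count_log_signals_py_alt (text : String) : List (String × Int) :=
  let hist : PySem.Dict (Bool × Bool × Bool) Int :=
    (PySem.Str.splitlines text).foldl (fun hist line =>
      let low := PySem.Str.lower line
      let sig : Bool × Bool × Bool :=
        (PySem.Str.isIn "409" line &&
           (PySem.Str.isIn "conflict" low || PySem.Str.isIn "http error 409" low),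
         PySem.Str.isIn "conflict" low &&
           (PySem.Str.isIn "telegram" low || PySem.Str.isIn "webhook" low ||
            PySem.Str.isIn "poller" low),
         PySem.Str.isIn "getupdates" low &&
           (PySem.Str.isIn "409" line || PySem.Str.isIn "conflict" low))
      hist.insert sig (hist.getD sig 0 + 1)) PySem.Dict.empty
  let acc := hist.items.foldl (fun acc p =>
      let total := acc.1 + p.2
      let h409 := if p.1.1 then acc.2.1 + p.2 else acc.2.1
      let ct := if p.1.2.1 then acc.2.2.1 + p.2 else acc.2.2.1
      let gu := if p.1.2.2 then acc.2.2.2 + p.2 else acc.2.2.2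
      (total, h409, ct, gu)) ((0:Int), (0:Int), (0:Int), (0:Int))
  [("lines_total", acc.1), ("http_409", acc.2.1),
   ("conflict_token", acc.2.2.1), ("getupdates_hint", acc.2.2.2)]

-- ===== PRECONDITION & SPEC =====
def Spec_count_log_signals_py (text : String) (out : List (String × Int)) : Prop := out = count_log_signals_py_alt text
instance (text : String) (out : List (String × Int)) : Decidable (Spec_count_log_signals_py text out) := by unfold Spec_count_log_signals_py; infer_instance

-- ===== CLAIM (what is proved, stated in full; the proofs are below) =====
def Claim_equal_count_log_signals_py : Prop := ∀ (text : String), Dom_count_log_signals_py text → Spec_count_log_signals_py text (count_log_signals_py text)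

-- ===== LEMMAS AND PROOFS =====

def pvP1 (line : String) : Bool :=
  PySem.Str.isIn "409" line &&
    (PySem.Str.isIn "conflict" (PySem.Str.lower line) ||
     PySem.Str.isIn "http error 409" (PySem.Str.lower line))

def pvP2 (line : String) : Bool :=
  PySem.Str.isIn "conflict" (PySem.Str.lower line) &&
    (PySem.Str.isIn "telegram" (PySem.Str.lower line) ||
     PySem.Str.isIn "webhook" (PySem.Str.lower line) ||
     PySem.Str.isIn "poller" (PySem.Str.lower line))

def pvP3 (line : String) : Bool :=
  PySem.Str.isIn "getupdates" (PySem.Str.lower line) &&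
    (PySem.Str.isIn "409" line || PySem.Str.isIn "conflict" (PySem.Str.lower line))

def pvSig (line : String) : Bool × Bool × Bool := (pvP1 line, pvP2 line, pvP3 line)

def pvD (n a b c : Int) : PySem.Dict String Int :=
  PySem.Dict.mk [("lines_total", n), ("http_409", a),
                 ("conflict_token", b), ("getupdates_hint", c)]

-- A's loop body, named so the lemmas below can speak about it
def pvStepFn (out : PySem.Dict String Int) (line : String) : PySem.Dict String Int :=
  let lower := PySem.Str.lower line
  let out := if PySem.Str.isIn "409" line &&
      (PySem.Str.isIn "conflict" lower || PySem.Str.isIn "http error 409" lower) then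
      out.modify "http_409" 0 (· + 1) else out
  let out := if PySem.Str.isIn "conflict" lower &&
      (PySem.Str.isIn "telegram" lower || PySem.Str.isIn "webhook" lower ||
       PySem.Str.isIn "poller" lower) then
      out.modify "conflict_token" 0 (· + 1) else out
  let out := if PySem.Str.isIn "getupdates" lower &&
      (PySem.Str.isIn "409" line || PySem.Str.isIn "conflict" lower) then
      out.modify "getupdates_hint" 0 (· + 1) else out
  out

-- one loop step of A on the concrete four-key dict
theorem pvStep (line : String) (n a b c : Int) :
    pvStepFn (pvD n a b c) line =
    pvD n (a + if pvP1 line then 1 else 0) (b + if pvP2 line then 1 else 0)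
          (c + if pvP3 line then 1 else 0) := by
  simp only [pvStepFn, pvP1, pvP2, pvP3]
  split_ifs <;> simp_all [pvD, PySem.Dict.modify, PySem.Dict.get?, PySem.Dict.insert,
    PySem.Dict.contains, PySem.Dict.getD]

theorem pvLoop (ls : List String) (n a b c : Int) :
    ls.foldl pvStepFn (pvD n a b c) =
    pvD n (a + (ls.map (fun l => if pvP1 l then (1:Int) else 0)).sum)
          (b + (ls.map (fun l => if pvP2 l then (1:Int) else 0)).sum)
          (c + (ls.map (fun l => if pvP3 l then (1:Int) else 0)).sum) := by
  induction ls generalizing a b c with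
  | nil => simp
  | cons h t ih =>
    rw [List.foldl_cons, pvStep h n a b c, ih]
    simp only [List.map_cons, List.sum_cons]
    ring_nf

-- B's aggregation loop body, named
def pvAggFn (acc : Int × Int × Int × Int) (p : (Bool × Bool × Bool) × Int) :
    Int × Int × Int × Int :=
  let total := acc.1 + p.2
  let h409 := if p.1.1 then acc.2.1 + p.2 else acc.2.1
  let ct := if p.1.2.1 then acc.2.2.1 + p.2 else acc.2.2.1
  let gu := if p.1.2.2 then acc.2.2.2 + p.2 else acc.2.2.2
  (total, h409, ct, gu)

-- B's aggregation fold is four independent weighted sums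
theorem pvAgg (l : List ((Bool × Bool × Bool) × Int)) (t h c g : Int) :
    l.foldl pvAggFn (t, h, c, g) =
    (t + (l.map (·.2)).sum,
     h + (l.map (fun p => if p.1.1 then p.2 else 0)).sum,
     c + (l.map (fun p => if p.1.2.1 then p.2 else 0)).sum,
     g + (l.map (fun p => if p.1.2.2 then p.2 else 0)).sum) := by
  induction l generalizing t h c g with
  | nil => simp
  | cons x xs ih =>
    rw [List.foldl_cons]
    simp only [pvAggFn]
    rw [ih]
    simp only [List.map_cons, List.sum_cons]
    split_ifs <;> simp <;> ring_nf
    all_goals simp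


theorem pvWS_bump {σ : Type} [BEq σ] [LawfulBEq σ] (q : σ → Bool) (l : List (σ × Int))
    (s : σ) (u : Int) (hnd : (l.map (·.1)).Nodup) (hmem : (s, u) ∈ l) :
    ((l.map (fun p => if p.1 == s then (s, u + 1) else p)).map
       (fun p => if q p.1 then p.2 else 0)).sum
    = (l.map (fun p => if q p.1 then p.2 else 0)).sum + (if q s then 1 else 0) := by
  induction l with
  | nil => cases hmem
  | cons x xs ih =>
    simp only [List.map_cons, List.nodup_cons, List.mem_map] at hnd
    by_cases hx : x.1 == s
    · have hxs : x.1 = s := by simpa using hx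
      have hxu : x = (s, u) := by
        rcases List.mem_cons.mp hmem with h | h
        · exact h.symm
        · exact absurd ⟨(s, u), h, by rw [hxs]⟩ hnd.1
      have htail : xs.map (fun p => if p.1 == s then (s, u + 1) else p) = xs := by
        have h' : ∀ p ∈ xs, (if p.1 == s then (s, u + 1) else p) = id p := by
          intro p hp
          have : p.1 ≠ s := fun he => hnd.1 ⟨p, hp, by rw [hxs, he]⟩
          simp [this]
        rw [List.map_congr_left h', List.map_id]
      subst hxu
      simp only [List.map_cons, htail, List.sum_cons, beq_self_eq_true, if_true]
      split_ifs <;> ring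
    · have hxne : x.1 ≠ s := by simpa using hx
      have hmem' : (s, u) ∈ xs := by
        rcases List.mem_cons.mp hmem with h | h
        · exact absurd (by rw [← h]) hxne
        · exact h
      simp only [List.map_cons, List.sum_cons, hx, Bool.false_eq_true, if_false,
        ih hnd.2 hmem']
      ring

theorem pvCounterSumStep {σ : Type} [BEq σ] [LawfulBEq σ] (q : σ → Bool)
    (d : PySem.Dict σ Int) (s : σ) (hnd : d.keys.Nodup) :
    (((d.insert s (d.getD s 0 + 1)).items).map (fun p => if q p.1 then p.2 else 0)).sum
    = ((d.items).map (fun p => if q p.1 then p.2 else 0)).sum + (if q s then 1 else 0) := by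
  by_cases hc : d.contains s = true
  · obtain ⟨v, hv⟩ : ∃ v, d.get? s = some v := by
      rw [PySem.Dict.contains_eq_isSome_get?] at hc
      exact Option.isSome_iff_exists.mp hc
    rw [PySem.Dict.items_insert_of_contains d _ hc, PySem.Dict.getD_of_get?_eq_some d 0 hv]
    exact pvWS_bump q d.items s v (by simpa [PySem.Dict.keys] using hnd)
      (PySem.Dict.mem_items_of_get?_eq_some d hv)
  · rw [PySem.Dict.items_insert_of_not_contains d _ (by simpa using hc),
      PySem.Dict.getD_of_not_contains d 0 (by simpa using hc)]
    simp

theorem pvCounterSum {σ : Type} [BEq σ] [LawfulBEq σ] (q : σ → Bool) (xs : List σ)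
    (d : PySem.Dict σ Int) (hnd : d.keys.Nodup) :
    (((xs.foldl (fun d x => d.insert x (d.getD x 0 + 1)) d).items).map
       (fun p => if q p.1 then p.2 else 0)).sum
    = ((d.items).map (fun p => if q p.1 then p.2 else 0)).sum
      + (xs.map (fun x => if q x then (1 : Int) else 0)).sum := by
  induction xs generalizing d with
  | nil => simp
  | cons x t ih =>
    rw [List.foldl_cons, ih _ (PySem.Dict.nodup_keys_insert d x _ hnd),
      pvCounterSumStep q d x hnd]
    simp only [List.map_cons, List.sum_cons]
    ring

-- total weights over the histogram items equal the element count
theorem pvCounterSumTotal {σ : Type} [BEq σ] [LawfulBEq σ] (xs : List σ) :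
    (((xs.foldl (fun d x => d.insert x (d.getD x 0 + 1))
        (PySem.Dict.empty : PySem.Dict σ Int)).items).map (·.2)).sum
    = (xs.length : Int) := by
  have h := pvCounterSum (fun _ => true) xs PySem.Dict.empty PySem.Dict.nodup_keys_empty
  simpa [PySem.Dict.empty] using h

-- ===== VERDICT (by name: the statement is the Claim_ definition above) =====
theorem count_log_signals_py_spec : Claim_equal_count_log_signals_py := by
  intro text _
  show count_log_signals_py text = count_log_signals_py_alt text
  have hA : count_log_signals_py text =
      ((PySem.Str.splitlines text).foldl pvStepFn
        (pvD ((PySem.Str.splitlines text).length : Int) 0 0 0)).items := rfl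
  have hB : count_log_signals_py_alt text =
      (let hist := ((PySem.Str.splitlines text).map pvSig).foldl
          (fun d s => d.insert s (d.getD s 0 + 1)) PySem.Dict.empty
       let acc := hist.items.foldl pvAggFn ((0:Int), (0:Int), (0:Int), (0:Int))
       [("lines_total", acc.1), ("http_409", acc.2.1),
        ("conflict_token", acc.2.2.1), ("getupdates_hint", acc.2.2.2)]) := by
    rw [List.foldl_map]
    rfl
  rw [hA, hB, pvLoop]
  simp only [pvAgg]
  have h1 := pvCounterSum (fun v : Bool × Bool × Bool => v.1)
    ((PySem.Str.splitlines text).map pvSig) PySem.Dict.empty PySem.Dict.nodup_keys_empty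
  have h2 := pvCounterSum (fun v : Bool × Bool × Bool => v.2.1)
    ((PySem.Str.splitlines text).map pvSig) PySem.Dict.empty PySem.Dict.nodup_keys_empty
  have h3 := pvCounterSum (fun v : Bool × Bool × Bool => v.2.2)
    ((PySem.Str.splitlines text).map pvSig) PySem.Dict.empty PySem.Dict.nodup_keys_empty
  have ht := pvCounterSumTotal ((PySem.Str.splitlines text).map pvSig)
  have hempty : (PySem.Dict.empty : PySem.Dict (Bool × Bool × Bool) Int).items = [] := rfl
  simp only [hempty, List.map_nil, List.sum_nil, zero_add, List.length_map] at h1 h2 h3 ht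
  rw [ht, h1, h2, h3]
  simp only [pvD, zero_add, List.map_map, Function.comp_def, pvSig]
  rfl
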